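-- pv_equiv track=rewrite | github.com/romanskz/Proj1MiningPatterns | frequent_itemset_miner_final.py | get_vertical_rep
-- ===== SOURCE A (Python) =====
-- def get_vertical_rep(transactions):
-- 	"""
-- 	:param transactions: list of all the transactions of the database
-- 	:return: Vertical representation of the initial database (with the element 0 corresponding to the empty set)
-- 	"""
-- 	vertical_rep = dict()
-- 	vertical_rep[0] = set()
-- 	for i in range(len(transactions)):
-- 		vertical_rep[0].add(i + 1)
-- 		for elem in transactions[i]:
-- 			if elem not in vertical_rep:
-- 				vertical_rep[elem] = set()
-- 			vertical_rep[elem].add(i + 1)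
-- 	return vertical_rep
-- ===== SOURCE B (Python) =====
-- def get_vertical_rep(transactions):
--     # Inverted decomposition: collect the universe of distinct non-zero items first,
--     # then build each item's transaction-id set by a per-item scan over the
--     # (precomputed) indexed transaction sets; key 0 is the full index range.
--     universe = []
--     seen = set()
--     for t in transactions:
--         for e in t:
--             if e != 0 and e not in seen:
--                 seen.add(e)
--                 universe.append(e)
--     indexed = [(i + 1, set(t)) for i, t in enumerate(transactions)]
--     rep = {0: set(range(1, len(transactions) + 1))}
--     for item in universe:
--         rep[item] = {i for i, s in indexed if item in s}
--     return rep
-- ===== Notes on version B (the rewrite author's own statement) =====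
-- stated objective: alternative
-- what changed: B inverts the traversal: it first collects the universe of distinct non-zero items in one pass, sets key 0 to the full index set range(1, n+1) in closed form, and then builds each item's transaction-id set by a per-item scan over the transactions, instead of A's single indexed pass that accumulates all sets at once in a dict.
import Mathlib
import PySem

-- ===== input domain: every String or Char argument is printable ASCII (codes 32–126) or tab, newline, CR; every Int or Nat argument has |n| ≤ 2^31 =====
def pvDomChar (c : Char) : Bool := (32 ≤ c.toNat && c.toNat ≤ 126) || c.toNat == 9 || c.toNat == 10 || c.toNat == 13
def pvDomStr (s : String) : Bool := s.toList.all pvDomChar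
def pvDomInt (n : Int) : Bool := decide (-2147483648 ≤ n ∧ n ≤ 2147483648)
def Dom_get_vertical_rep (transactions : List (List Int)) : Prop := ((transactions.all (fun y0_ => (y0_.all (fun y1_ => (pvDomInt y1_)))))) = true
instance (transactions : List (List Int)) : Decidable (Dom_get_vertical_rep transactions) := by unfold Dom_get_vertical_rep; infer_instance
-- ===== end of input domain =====

-- B inverts A's decomposition: it collects the universe of distinct non-zero items first,
-- then fills each item's transaction-id set by a per-item scan, with key 0 as the full
-- index range in closed form (objective: alternative decomposition, same exact result).

-- ===== PORT A =====
def get_vertical_rep (transactions : List (List Int)) : List (Int × List Int) :=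
  let vr : PySem.Dict Int (PySem.Set Int) := (PySem.Dict.empty).insert 0 PySem.Set.empty
  let vr := (PySem.List.pyRange 0 ((transactions.length : Int))).foldl
    (fun vr i =>
      let vr := vr.modify 0 [] (fun s => PySem.Set.add s (i + 1))
      (PySem.List.pyGetD transactions i []).foldl
        (fun vr elem =>
          let vr := if vr.contains elem then vr else vr.insert elem PySem.Set.empty
          vr.modify elem [] (fun s => PySem.Set.add s (i + 1))) vr)
    vr
  vr.items

-- ===== PORT B =====
def get_vertical_rep_alt (transactions : List (List Int)) : List (Int × List Int) :=
  let us : List Int × PySem.Set Int := transactions.foldl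
    (fun us t => t.foldl
      (fun (us : List Int × PySem.Set Int) e =>
        if e ≠ 0 ∧ e ∉ us.2 then (us.1 ++ [e], PySem.Set.add us.2 e) else us) us)
    ([], PySem.Set.empty)
  let indexed : List (Int × PySem.Set Int) :=
    (PySem.List.enumerate transactions).map (fun p => (p.1 + 1, PySem.Set.ofList p.2))
  let rep : PySem.Dict Int (PySem.Set Int) :=
    PySem.Dict.ofList [(0, PySem.Set.ofList (PySem.List.pyRange 1 ((transactions.length : Int) + 1)))]
  let rep := us.1.foldl
    (fun rep item =>
      rep.insert item (PySem.Set.ofList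
        ((indexed.filter (fun q => q.2.contains item)).map (fun q => q.1))))
    rep
  rep.items

-- ===== PRECONDITION & SPEC =====
def Spec_get_vertical_rep (transactions : List (List Int)) (out : List (Int × List Int)) : Prop := out = get_vertical_rep_alt transactions
instance (transactions : List (List Int)) (out : List (Int × List Int)) : Decidable (Spec_get_vertical_rep transactions out) := by unfold Spec_get_vertical_rep; infer_instance

-- ===== CLAIM (what is proved, stated in full; the proofs are below) =====
def Claim_equal_get_vertical_rep : Prop := ∀ (transactions : List (List Int)), Dom_get_vertical_rep transactions → Spec_get_vertical_rep transactions (get_vertical_rep transactions)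

-- ===== LEMMAS AND PROOFS =====

def pvStep (vr : PySem.Dict Int (PySem.Set Int)) (i : Int) (t : List Int) : PySem.Dict Int (PySem.Set Int) :=
  t.foldl
    (fun vr elem =>
      let vr := if vr.contains elem then vr else vr.insert elem PySem.Set.empty
      vr.modify elem [] (fun s => PySem.Set.add s (i + 1)))
    (vr.modify 0 [] (fun s => PySem.Set.add s (i + 1)))

theorem pv_add_mem {s : PySem.Set Int} {x : Int} (h : x ∈ s) : PySem.Set.add s x = s := by
  simp [PySem.Set.add, PySem.Set.contains, h]

theorem pv_add_not_mem {s : PySem.Set Int} {x : Int} (h : x ∉ s) : PySem.Set.add s x = s ++ [x] := by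
  simp [PySem.Set.add, PySem.Set.contains, h]

theorem pv_add_add (s : PySem.Set Int) (x : Int) :
    PySem.Set.add (PySem.Set.add s x) x = PySem.Set.add s x := by
  apply pv_add_mem
  exact (PySem.Set.mem_add s x x).2 (Or.inr rfl)

theorem pv_body_getD (vr : PySem.Dict Int (PySem.Set Int)) (i e k : Int) :
    ((let vr' := if vr.contains e then vr else vr.insert e PySem.Set.empty
      vr'.modify e [] (fun s => PySem.Set.add s (i + 1))).getD k [])
    = if k = e then PySem.Set.add (vr.getD k []) (i + 1) else vr.getD k [] := by
  by_cases hc : vr.contains e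
  · simp only [hc, if_true, PySem.Dict.getD_modify]
    split_ifs with h
    · subst h; rfl
    · rfl
  · simp only [hc, if_false, Bool.false_eq_true, PySem.Dict.getD_modify, PySem.Dict.getD_insert]
    by_cases hk : k = e
    · subst hk
      simp [PySem.Dict.getD_of_not_contains vr ([] : PySem.Set Int) (by simpa using hc)]
    · simp [hk]

theorem pv_inner_getD (i k : Int) : ∀ (t : List Int) (vr : PySem.Dict Int (PySem.Set Int)),
    ((t.foldl
      (fun vr elem =>
        let vr := if vr.contains elem then vr else vr.insert elem PySem.Set.empty
        vr.modify elem [] (fun s => PySem.Set.add s (i + 1))) vr).getD k [])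
    = if k ∈ t then PySem.Set.add (vr.getD k []) (i + 1) else vr.getD k [] := by
  intro t
  induction t with
  | nil => intro vr; simp
  | cons e t ih =>
    intro vr
    simp only [List.foldl_cons, ih, pv_body_getD, List.mem_cons]
    by_cases hk : k = e
    · subst hk
      by_cases ht : k ∈ t <;> simp [ht]
    · by_cases ht : k ∈ t <;> simp [hk, ht]

theorem pv_step_getD (vr : PySem.Dict Int (PySem.Set Int)) (i : Int) (t : List Int) (k : Int) :
    (pvStep vr i t).getD k []
    = if k = 0 ∨ k ∈ t then PySem.Set.add (vr.getD k []) (i + 1) else vr.getD k [] := by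
  unfold pvStep
  rw [pv_inner_getD]
  by_cases hk : k = 0
  · subst hk
    by_cases ht : (0:Int) ∈ t <;> simp [ht, PySem.Dict.getD_modify, pv_add_add]
  · by_cases ht : k ∈ t <;> simp [hk, ht, PySem.Dict.getD_modify]

theorem pv_keys_insert (d : PySem.Dict Int (PySem.Set Int)) (k : Int) (v : PySem.Set Int) :
    (d.insert k v).keys = PySem.Set.add d.keys k := by
  by_cases hc : d.contains k
  · rw [PySem.Dict.keys_insert_of_contains d v hc,
      pv_add_mem ((PySem.Dict.contains_iff_mem_keys d k).1 hc)]
  · rw [PySem.Dict.keys_insert_of_not_contains d v (by simpa using hc),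
      pv_add_not_mem (fun hm => hc ((PySem.Dict.contains_iff_mem_keys d k).2 hm))]

theorem pv_body_keys (vr : PySem.Dict Int (PySem.Set Int)) (i e : Int) :
    ((let vr' := if vr.contains e then vr else vr.insert e PySem.Set.empty
      vr'.modify e [] (fun s => PySem.Set.add s (i + 1))).keys)
    = PySem.Set.add vr.keys e := by
  by_cases hc : vr.contains e
  · simp only [hc, if_true, PySem.Dict.keys_modify, pv_keys_insert]
  · simp only [hc, if_false, Bool.false_eq_true, PySem.Dict.keys_modify, pv_keys_insert]
    rw [pv_add_add]

theorem pv_inner_keys (i : Int) : ∀ (t : List Int) (vr : PySem.Dict Int (PySem.Set Int)),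
    ((t.foldl
      (fun vr elem =>
        let vr := if vr.contains elem then vr else vr.insert elem PySem.Set.empty
        vr.modify elem [] (fun s => PySem.Set.add s (i + 1))) vr).keys)
    = PySem.Set.update vr.keys t := by
  intro t
  induction t with
  | nil => intro vr; simp [PySem.Set.update]
  | cons e t ih =>
    intro vr
    simp only [List.foldl_cons, ih, pv_body_keys, PySem.Set.update]

theorem pv_step_keys (vr : PySem.Dict Int (PySem.Set Int)) (i : Int) (t : List Int)
    (h0 : (0:Int) ∈ vr.keys) :
    (pvStep vr i t).keys = PySem.Set.update vr.keys t := by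
  unfold pvStep
  rw [pv_inner_keys, PySem.Dict.keys_modify, pv_keys_insert, pv_add_mem h0]

theorem pv_mem_update (s : PySem.Set Int) (l : List Int) {x : Int} (h : x ∈ s) :
    x ∈ PySem.Set.update s l := by
  induction l generalizing s with
  | nil => simpa [PySem.Set.update]
  | cons e l ih =>
    simp only [PySem.Set.update, List.foldl_cons] at *
    exact ih _ ((PySem.Set.mem_add s e x).2 (Or.inl h))

theorem pv_outer_getD (k : Int) : ∀ (ts : List (List Int)) (s : Int) (vr : PySem.Dict Int (PySem.Set Int)),
    (∀ x ∈ vr.getD k [], x ≤ s) →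
    (((PySem.List.enumerate ts s).foldl (fun vr p => pvStep vr p.1 p.2) vr).getD k [])
      = vr.getD k [] ++ ((PySem.List.enumerate ts s).filter
          (fun p => k == 0 || p.2.contains k)).map (fun p => p.1 + 1) := by
  intro ts
  induction ts with
  | nil => intro s vr _; simp [PySem.List.enumerate]
  | cons t ts ih =>
    intro s vr hb
    rw [PySem.List.enumerate_cons]
    simp only [List.foldl_cons, List.filter_cons]
    have hstep := pv_step_getD vr s t k
    have hcond : ((k == 0 || t.contains k) = true) ↔ (k = 0 ∨ k ∈ t) := by
      simp
    have hnotmem : (s + 1) ∉ vr.getD k [] := fun hm => by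
      have := hb _ hm; omega
    by_cases hc : k = 0 ∨ k ∈ t
    · have hb' : ∀ x ∈ (pvStep vr s t).getD k [], x ≤ s + 1 := by
        intro x hx
        rw [hstep, if_pos hc, pv_add_not_mem hnotmem] at hx
        rcases List.mem_append.1 hx with h | h
        · have := hb _ h; omega
        · simp at h; omega
      rw [ih (s+1) _ hb', hstep, if_pos hc, pv_add_not_mem hnotmem,
        if_pos (hcond.2 hc)]
      simp
    · have hb' : ∀ x ∈ (pvStep vr s t).getD k [], x ≤ s + 1 := by
        intro x hx
        rw [hstep, if_neg hc] at hx
        have := hb _ hx; omega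
      rw [ih (s+1) _ hb', hstep, if_neg hc, if_neg (by simpa [hcond] using hc)]

theorem pv_outer_keys : ∀ (ts : List (List Int)) (s : Int) (vr : PySem.Dict Int (PySem.Set Int)),
    (0:Int) ∈ vr.keys →
    (((PySem.List.enumerate ts s).foldl (fun vr p => pvStep vr p.1 p.2) vr).keys)
      = PySem.Set.update vr.keys ts.flatten := by
  intro ts
  induction ts with
  | nil => intro s vr _; simp [PySem.List.enumerate, PySem.Set.update]
  | cons t ts ih =>
    intro s vr h0
    rw [PySem.List.enumerate_cons]
    simp only [List.foldl_cons, List.flatten_cons]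
    rw [ih (s+1) _ (by rw [pv_step_keys vr s t h0]; exact pv_mem_update _ _ h0),
      pv_step_keys vr s t h0]
    simp [PySem.Set.update, List.foldl_append]

theorem pv_update_cons_zero : ∀ (l : List Int) (u : List Int),
    PySem.Set.update ((0:Int) :: u) l
      = 0 :: PySem.Set.update u (l.filter (fun e => decide (e ≠ 0))) := by
  intro l
  induction l with
  | nil => intro u; simp [PySem.Set.update]
  | cons e l ih =>
    intro u
    by_cases he : e = 0
    · subst he
      simp only [PySem.Set.update, List.foldl_cons, List.filter_cons]
      rw [pv_add_mem (by simp)]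
      simpa [PySem.Set.update] using ih u
    · have hfe : (e :: l).filter (fun e => decide (e ≠ 0)) = e :: l.filter (fun e => decide (e ≠ 0)) := by
        simp [he]
      rw [hfe]
      simp only [PySem.Set.update, List.foldl_cons]
      by_cases hu : e ∈ u
      · rw [pv_add_mem (show e ∈ (0:Int) :: u by simp [hu]), pv_add_mem hu]
        simpa [PySem.Set.update] using ih u
      · rw [pv_add_not_mem (show e ∉ (0:Int) :: u by simp [hu, he]), pv_add_not_mem hu]
        simpa [PySem.Set.update] using ih (u ++ [e])

theorem pv_univ : ∀ (l : List Int) (u : List Int),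
    l.foldl
      (fun (us : List Int × PySem.Set Int) e =>
        if e ≠ 0 ∧ e ∉ us.2 then (us.1 ++ [e], PySem.Set.add us.2 e) else us) (u, u)
    = (PySem.Set.update u (l.filter (fun e => decide (e ≠ 0))),
       PySem.Set.update u (l.filter (fun e => decide (e ≠ 0)))) := by
  intro l
  induction l with
  | nil => intro u; simp [PySem.Set.update]
  | cons e l ih =>
    intro u
    by_cases he : e = 0
    · subst he
      simpa [PySem.Set.update, List.filter_cons] using ih u
    · have hfe : (e :: l).filter (fun e => decide (e ≠ 0)) = e :: l.filter (fun e => decide (e ≠ 0)) := by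
        simp [he]
      rw [hfe]
      simp only [PySem.Set.update, List.foldl_cons]
      by_cases hu : e ∈ u
      · rw [pv_add_mem hu]
        simpa [he, hu, PySem.Set.update] using ih u
      · rw [pv_add_not_mem hu]
        simpa [he, hu, PySem.Set.update] using ih (u ++ [e])

theorem pv_map_add_one : ∀ (n : Nat) (s : Int),
    (PySem.List.pyRange s (s + (n:Int))).map (fun x => x + 1)
      = PySem.List.pyRange (s + 1) (s + 1 + (n:Int)) := by
  intro n
  induction n with
  | zero => intro s; simp [PySem.List.pyRange]
  | succ n ih =>
    intro s
    have h1 : s + ((n:Int) + 1) = (s + (n:Int)) + 1 := by ring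
    have h2 : s + 1 + ((n:Int) + 1) = (s + 1 + (n:Int)) + 1 := by ring
    push_cast
    rw [h1, h2, PySem.List.pyRange_one_succ_right (by omega),
      PySem.List.pyRange_one_succ_right (by omega), List.map_append, ih]
    simp
    omega

-- assembly pieces
theorem pv_init_getD (k : Int) :
    ((PySem.Dict.empty.insert (0:Int) (PySem.Set.empty : PySem.Set Int)).getD k []) = [] := by
  rw [PySem.Dict.getD_insert]
  split_ifs <;> simp [PySem.Dict.getD_empty, PySem.Set.empty]

theorem pv_init_keys :
    ((PySem.Dict.empty.insert (0:Int) (PySem.Set.empty : PySem.Set Int)).keys) = [0] := by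
  decide

theorem pv_A_getD (ts : List (List Int)) (k : Int) :
    (((PySem.List.enumerate ts 0).foldl (fun vr p => pvStep vr p.1 p.2)
        (PySem.Dict.empty.insert 0 PySem.Set.empty)).getD k [])
      = ((PySem.List.enumerate ts 0).filter
          (fun p => k == 0 || p.2.contains k)).map (fun p => p.1 + 1) := by
  rw [pv_outer_getD k ts 0 _ (by rw [pv_init_getD]; intro x hx; cases hx), pv_init_getD]
  simp

theorem pv_A_keys (ts : List (List Int)) :
    (((PySem.List.enumerate ts 0).foldl (fun vr p => pvStep vr p.1 p.2)
        (PySem.Dict.empty.insert 0 PySem.Set.empty)).keys)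
      = 0 :: PySem.Set.update [] (ts.flatten.filter (fun e => decide (e ≠ 0))) := by
  rw [pv_outer_keys ts 0 _ (by rw [pv_init_keys]; simp), pv_init_keys,
    pv_update_cons_zero]

theorem pv_A_items (ts : List (List Int)) :
    get_vertical_rep ts
      = ((PySem.List.enumerate ts 0).foldl (fun vr p => pvStep vr p.1 p.2)
          (PySem.Dict.empty.insert 0 PySem.Set.empty)).items := by
  unfold get_vertical_rep pvStep
  rw [PySem.List.enumerate_eq_map_pyRange ts ([] : List Int), List.foldl_map]
  rfl

theorem pv_U_nodup (ts : List (List Int)) :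
    (PySem.Set.update [] (ts.flatten.filter (fun e => decide (e ≠ 0)))).Nodup := by
  rw [show PySem.Set.update [] (ts.flatten.filter (fun e => decide (e ≠ 0)))
      = PySem.Set.ofList (ts.flatten.filter (fun e => decide (e ≠ 0))) from
    (PySem.Set.ofList_eq_foldl _).symm]
  exact PySem.Set.nodup_ofList _

theorem pv_U_ne_zero (ts : List (List Int)) {a : Int}
    (h : a ∈ PySem.Set.update [] (ts.flatten.filter (fun e => decide (e ≠ 0)))) : a ≠ 0 := by
  rw [show PySem.Set.update [] (ts.flatten.filter (fun e => decide (e ≠ 0)))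
      = PySem.Set.ofList (ts.flatten.filter (fun e => decide (e ≠ 0))) from
    (PySem.Set.ofList_eq_foldl _).symm] at h
  have := (PySem.Set.mem_ofList _ _).1 h
  simp at this
  tauto

theorem pv_head (ts : List (List Int)) :
    ((PySem.List.enumerate ts 0).filter (fun p => (0:Int) == 0 || p.2.contains 0)).map
        (fun p => p.1 + 1)
      = PySem.Set.ofList (PySem.List.pyRange 1 ((ts.length : Int) + 1)) := by
  have h1 : ((PySem.List.enumerate ts 0).filter (fun p => (0:Int) == 0 || p.2.contains 0))
      = PySem.List.enumerate ts 0 := by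
    apply List.filter_eq_self.2; intro p _; simp
  have h2 : (PySem.List.enumerate ts 0).map (fun p => p.1 + 1)
      = (PySem.List.pyRange 0 (0 + (ts.length:Int))).map (fun x => x + 1) := by
    rw [← PySem.List.map_fst_enumerate ts 0, List.map_map]; rfl
  have h3 := pv_map_add_one ts.length 0
  have h4 : PySem.List.pyRange ((0:Int) + 1) (0 + 1 + (ts.length:Int))
      = PySem.List.pyRange 1 ((ts.length:Int) + 1) := by norm_num [Int.add_comm]
  have hnd : (PySem.List.pyRange 1 ((ts.length:Int) + 1)).Nodup := by
    rw [← h4, ← h3, show (0:Int) + (ts.length:Int) = ((ts.length:Int)) by ring,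
      PySem.List.pyRange_zero_natCast, List.map_map]
    refine List.Nodup.map ?_ (List.nodup_range)
    intro a b h
    simpa using h
  rw [h1, h2, h3, h4, PySem.Set.ofList_eq_self_of_nodup _ hnd]

theorem pv_tail (ts : List (List Int)) {a : Int} (ha : a ≠ 0) :
    ((PySem.List.enumerate ts 0).filter (fun p => a == 0 || p.2.contains a)).map
        (fun p => p.1 + 1)
      = PySem.Set.ofList
          (((PySem.List.enumerate ts 0).filter (fun p => p.2.contains a)).map (fun p => p.1 + 1)) := by
  have h1 : ((PySem.List.enumerate ts 0).filter (fun p => a == 0 || p.2.contains a))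
      = (PySem.List.enumerate ts 0).filter (fun p => p.2.contains a) := by
    apply List.filter_congr; intro p _; simp [ha]
  have hnd : (((PySem.List.enumerate ts 0).filter (fun p => p.2.contains a)).map
      (fun p => p.1 + 1)).Nodup := by
    have hp : (((PySem.List.enumerate ts 0).filter (fun p => p.2.contains a))).Pairwise
        (fun p q => p.1 < q.1) := (PySem.List.pairwise_lt_enumerate ts 0).filter _
    have : ((((PySem.List.enumerate ts 0).filter (fun p => p.2.contains a)).map
        (fun p => p.1 + 1))).Pairwise (· < ·) := by
      rw [List.pairwise_map]
      exact hp.imp (by intro p q h; omega)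
    exact this.nodup
  rw [h1, PySem.Set.ofList_eq_self_of_nodup _ hnd]

theorem pv_repr0 (R : PySem.Set Int) :
    PySem.Dict.ofList [((0:Int), R)] = PySem.Dict.mk [(0, R)] := by rfl


theorem pv_contains_ofList (t : List Int) (a : Int) :
    (PySem.Set.ofList t).contains a = t.contains a := by
  by_cases h : a ∈ t
  · simp [PySem.Set.contains, h, (PySem.Set.mem_ofList t a).2 h]
  · have h2 : a ∉ PySem.Set.ofList t := fun hm => h ((PySem.Set.mem_ofList t a).1 hm)
    simp [PySem.Set.contains, h, h2]

theorem pv_indexed (ts : List (List Int)) (a : Int) :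
    ((((PySem.List.enumerate ts 0).map (fun p => (p.1 + 1, PySem.Set.ofList p.2))).filter
        (fun q => q.2.contains a)).map (fun q => q.1))
      = ((PySem.List.enumerate ts 0).filter (fun p => p.2.contains a)).map (fun p => p.1 + 1) := by
  rw [List.filter_map, List.map_map]
  congr 1
  apply List.filter_congr
  intro p _
  simp [pv_contains_ofList]

theorem pv_main (ts : List (List Int)) :
    get_vertical_rep ts = get_vertical_rep_alt ts := by
  have hU := pv_U_nodup ts
  have hUz : ∀ a ∈ PySem.Set.update [] (ts.flatten.filter (fun e => decide (e ≠ 0))), a ≠ 0 :=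
    fun a ha => pv_U_ne_zero ts ha
  have hA : get_vertical_rep ts
      = (0, PySem.Set.ofList (PySem.List.pyRange 1 ((ts.length : Int) + 1)))
        :: (PySem.Set.update [] (ts.flatten.filter (fun e => decide (e ≠ 0)))).map (fun a => (a,
          PySem.Set.ofList (((PySem.List.enumerate ts 0).filter (fun p => p.2.contains a)).map
            (fun p => p.1 + 1)))) := by
    have hknd : ((PySem.List.enumerate ts 0).foldl (fun vr p => pvStep vr p.1 p.2)
        (PySem.Dict.empty.insert 0 PySem.Set.empty)).keys.Nodup := by
      rw [pv_A_keys ts]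
      exact List.nodup_cons.2 ⟨fun h => hUz 0 h rfl, hU⟩
    rw [pv_A_items ts, PySem.Dict.items_eq_map_keys _ hknd ([] : PySem.Set Int), pv_A_keys ts,
      List.map_cons]
    congr 1
    · rw [pv_A_getD ts 0, pv_head ts]
    · apply List.map_congr_left
      intro a ha
      rw [pv_A_getD ts a, pv_tail ts (hUz a ha)]
  have hB : get_vertical_rep_alt ts
      = (0, PySem.Set.ofList (PySem.List.pyRange 1 ((ts.length : Int) + 1)))
        :: (PySem.Set.update [] (ts.flatten.filter (fun e => decide (e ≠ 0)))).map (fun a => (a,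
          PySem.Set.ofList (((PySem.List.enumerate ts 0).filter (fun p => p.2.contains a)).map
            (fun p => p.1 + 1)))) := by
    unfold get_vertical_rep_alt
    rw [← List.foldl_flatten, show (PySem.Set.empty : PySem.Set Int) = ([] : List Int) from rfl,
      pv_univ ts.flatten []]
    rw [pv_repr0]
    rw [PySem.Dict.items_foldl_insert_fresh _ (fun a => a) _ _
      (by intro a ha
          have := hUz a (by simpa using ha)
          simp [PySem.Dict.contains]
          omega)
      (by simpa using hU)]
    simp only [List.cons_append, List.nil_append]
    congr 1
    apply List.map_congr_left
    intro a ha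
    rw [pv_indexed ts a]
  rw [hA, hB]

-- ===== VERDICT (by name: the statement is the Claim_ definition above) =====
theorem get_vertical_rep_spec : Claim_equal_get_vertical_rep := by
  intro ts _
  unfold Spec_get_vertical_rep
  exact pv_main ts
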